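-- pv_equiv track=rewrite | github.com/vishank01/DSA-Practice | microsoft/test.py | get_formatted_string
-- ===== SOURCE A (Python) =====
-- def get_formatted_string(n:int)->str:
--     """generate string by combining two alphabets to the next coming alphabet until we reach Z
--         e.g, n=5 means AAAAA -> BBA -> CA
--     Args:
--         n (int): number of A's present in a string
--
--     Returns:
--         str: [description]
--
--     >>> get_formatted_string(67108876)
--     'ZZDC'
--     >>> get_formatted_string(19)
--     'EBA'
--     >>> get_formatted_string(11)
--     'DBA'
--     >>> get_formatted_string(8)
--     'D'
--     """
--     op = []
--     chr_val = 65
--     while(n>0):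
--         if chr_val<90:
--             #check if number is odd and store last character value in output
--             if n%2!=0:
--                 op.append(chr(chr_val))
--             #increment char value (e.g, from A to B while doing right shift)
--             chr_val+=1
--         else:
--             op.append(chr(chr_val))
--         #right shift divides data by 2
--         n=n>>1
--     return "".join(op[::-1])
-- ===== SOURCE B (Python) =====
-- def get_formatted_string(n: int) -> str:
--     if n <= 0:
--         return ''
--     # Z-count in closed form: each bit at position >= 25, up to the top set bit, contributes one 'Z'
--     z = (n >> 25).bit_length()
--     letters = [chr(65 + i) for i in reversed(range(25)) if (n >> i) & 1]
--     return 'Z' * z + ''.join(letters)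
-- ===== Notes on version B (the rewrite author's own statement) =====
-- stated objective: alternative
-- what changed: Replaces A's bit-by-bit while-loop that accumulates letters in LSB order and reverses at the end by a closed-form Z-count ((n >> 25).bit_length()) plus a single MSB-first comprehension over bit positions 24..0.
import Mathlib
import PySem

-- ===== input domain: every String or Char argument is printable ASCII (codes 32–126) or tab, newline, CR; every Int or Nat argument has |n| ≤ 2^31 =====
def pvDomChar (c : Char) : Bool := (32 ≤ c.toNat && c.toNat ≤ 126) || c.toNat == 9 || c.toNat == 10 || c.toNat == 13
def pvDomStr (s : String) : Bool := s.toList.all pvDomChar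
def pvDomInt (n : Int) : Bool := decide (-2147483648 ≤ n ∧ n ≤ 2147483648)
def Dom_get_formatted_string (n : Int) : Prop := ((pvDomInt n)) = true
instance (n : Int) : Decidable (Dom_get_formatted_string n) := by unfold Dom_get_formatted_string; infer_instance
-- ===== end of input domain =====

-- B replaces A's bit-by-bit while-loop by a closed-form Z-count ((n >> 25).bit_length())
-- plus one MSB-first pass over bit positions 24..0 (objective: alternative decomposition).

-- ===== PORT A =====
-- the while-loop of A, state (n, chr_val, op); n>>1 is Int >>> (1:Nat) (Python-exact floor shift)
def getfLoop (n : Int) (chr_val : Nat) (op : List Char) : List Char :=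
  if _h : 0 < n then
    if chr_val < 90 then
      getfLoop (n >>> (1:Nat)) (chr_val + 1)
        (if PySem.Int.mod n 2 ≠ 0 then op ++ [Char.ofNat chr_val] else op)
    else
      getfLoop (n >>> (1:Nat)) chr_val (op ++ [Char.ofNat chr_val])
  else op
termination_by n.toNat
decreasing_by all_goals (rw [Int.shiftRight_eq_div_pow]; norm_num; omega)

-- "".join(op[::-1]); op[::-1] via PySem.List.slice? (never none)
def get_formatted_string (n : Int) : String :=
  String.ofList ((PySem.List.slice? (getfLoop n 65 []) none none (-1)).getD [])

-- ===== PORT B =====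
-- Source B line by line: guard, z = (n >> 25).bit_length(), letters for set bits 24..0, 'Z'*z + join
def get_formatted_string_alt (n : Int) : String :=
  if n ≤ 0 then ""
  else
    let z := PySem.Int.bitLength (n >>> (25:Nat))
    let letters := ((List.range 25).reverse.filter
        (fun (i : Nat) => PySem.Int.band (n >>> i) 1 != 0)).map (fun i => Char.ofNat (65 + i))
    String.ofList (List.replicate z 'Z' ++ letters)

-- ===== PRECONDITION & SPEC =====
def Spec_get_formatted_string (n : Int) (out : String) : Prop := out = get_formatted_string_alt n
instance (n : Int) (out : String) : Decidable (Spec_get_formatted_string n out) := by unfold Spec_get_formatted_string; infer_instance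

-- ===== CLAIM (what is proved, stated in full; the proofs are below) =====
def Claim_equal_get_formatted_string : Prop := ∀ (n : Int), Dom_get_formatted_string n → Spec_get_formatted_string n (get_formatted_string n)

-- ===== LEMMAS AND PROOFS =====

-- letters B emits for bit positions j-1..0 of m, shifted to alphabet offset k (descL 0 25 n = B's letters)
def descL (k j : Nat) (m : Int) : List Char :=
  ((List.range j).reverse.filter (fun (i : Nat) => PySem.Int.band (m >>> i) 1 != 0)).map
    (fun i => Char.ofNat (65 + k + i))

lemma shiftRight_one_nonneg {m : Int} (h : 0 ≤ m) : 0 ≤ m >>> (1:Nat) := by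
  rw [Int.shiftRight_eq_div_pow]; positivity

lemma shiftRight_one_toNat_lt {n : Int} (h : 0 < n) : (n >>> (1:Nat)).toNat < n.toNat := by
  rw [Int.shiftRight_eq_div_pow]; norm_num; omega

lemma floordiv_two_eq_shift {n : Int} (_h : 0 < n) : PySem.Int.floordiv n 2 = n >>> (1:Nat) := by
  rw [PySem.Int.floordiv_eq_ediv_of_pos (by omega), Int.shiftRight_eq_div_pow]; norm_num

lemma getfLoop_stop {n : Int} {cv : Nat} {op : List Char} (h : ¬ 0 < n) :
    getfLoop n cv op = op := by
  rw [getfLoop]; simp [h]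

lemma getfLoop_step_lt {n : Int} {cv : Nat} {op : List Char} (h : 0 < n) (hcv : cv < 90) :
    getfLoop n cv op =
      getfLoop (n >>> (1:Nat)) (cv + 1)
        (if PySem.Int.mod n 2 ≠ 0 then op ++ [Char.ofNat cv] else op) := by
  rw [getfLoop]; simp [h, hcv]

lemma getfLoop_step_ge {n : Int} {cv : Nat} {op : List Char} (h : 0 < n) (hcv : ¬ cv < 90) :
    getfLoop n cv op = getfLoop (n >>> (1:Nat)) cv (op ++ [Char.ofNat cv]) := by
  rw [getfLoop]; simp [h, hcv]

lemma getfLoop_append : ∀ (N : Nat) (n : Int), n.toNat ≤ N → ∀ (cv : Nat) (op : List Char),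
    getfLoop n cv op = op ++ getfLoop n cv [] := by
  intro N
  induction N with
  | zero =>
    intro n hN cv op
    have h : ¬ 0 < n := by omega
    rw [getfLoop_stop h, getfLoop_stop h]; simp
  | succ N ih =>
    intro n hN cv op
    by_cases h : 0 < n
    · have hlt : (n >>> (1:Nat)).toNat ≤ N := by
        have := shiftRight_one_toNat_lt h; omega
      by_cases hcv : cv < 90
      · rw [getfLoop_step_lt h hcv, getfLoop_step_lt h hcv,
            ih _ hlt (cv+1) (if PySem.Int.mod n 2 ≠ 0 then op ++ [Char.ofNat cv] else op),
            ih _ hlt (cv+1) (if PySem.Int.mod n 2 ≠ 0 then [] ++ [Char.ofNat cv] else [])]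
        split_ifs <;> simp
      · rw [getfLoop_step_ge h hcv, getfLoop_step_ge h hcv,
            ih _ hlt cv (op ++ [Char.ofNat cv]), ih _ hlt cv ([] ++ [Char.ofNat cv])]
        simp
    · rw [getfLoop_stop h, getfLoop_stop h]; simp

-- Z phase: with chr_val = 90 the loop emits one 'Z' per remaining bit
lemma getfLoop_z : ∀ (N : Nat) (n : Int), n.toNat ≤ N → 0 ≤ n →
    getfLoop n 90 [] = List.replicate (PySem.Int.bitLength n) 'Z' := by
  intro N
  induction N with
  | zero =>
    intro n hN h0
    have hn : n = 0 := by omega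
    subst hn
    rw [getfLoop_stop (by omega)]
    simp [PySem.Int.bitLength_zero]
  | succ N ih =>
    intro n hN h0
    by_cases h : 0 < n
    · have hlt : (n >>> (1:Nat)).toNat ≤ N := by
        have := shiftRight_one_toNat_lt h; omega
      rw [getfLoop_step_ge h (by omega),
          getfLoop_append (N+1) _ (by omega) 90 ([] ++ [Char.ofNat 90]),
          ih _ hlt (shiftRight_one_nonneg (le_of_lt h)),
          PySem.Int.bitLength_of_pos h, floordiv_two_eq_shift h]
      simp [List.replicate_succ]
    · have hn : n = 0 := by omega
      subst hn
      rw [getfLoop_stop (by omega)]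
      simp [PySem.Int.bitLength_zero]

lemma shift_succ (m : Int) (i : Nat) : m >>> (i+1) = m >>> (1:Nat) >>> i := by
  rw [← Int.shiftRight_add]; norm_num [Nat.add_comm]

lemma descL_succ (k j : Nat) (m : Int) :
    descL k (j+1) m = descL (k+1) j (m >>> (1:Nat))
        ++ (if PySem.Int.band m 1 != 0 then [Char.ofNat (65 + k)] else []) := by
  unfold descL
  rw [List.range_succ_eq_map]
  simp only [List.reverse_cons, List.filter_append, List.map_append]
  congr 1
  · rw [← List.map_reverse, List.filter_map, List.map_map]
    have hp : ((fun (i : Nat) => PySem.Int.band (m >>> i) 1 != 0) ∘ Nat.succ)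
        = fun (i : Nat) => PySem.Int.band (m >>> (1:Nat) >>> i) 1 != 0 := by
      funext i
      simp only [Function.comp_apply, Nat.succ_eq_add_one]
      rw [shift_succ]
    have hf : ((fun (i : Nat) => Char.ofNat (65 + k + i)) ∘ Nat.succ)
        = fun (i : Nat) => Char.ofNat (65 + (k + 1) + i) := by
      funext i
      simp only [Function.comp_apply, Nat.succ_eq_add_one]
      congr 1
      omega
    rw [hp, hf]
  · simp only [List.filter_cons, List.filter_nil]
    rw [show m >>> (0:Nat) = m from by simp]
    split_ifs <;> simp

-- the letter phase: chr_val = 90 - j, j bit positions left before the Z phase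
lemma getfLoop_letters : ∀ (j : Nat), j ≤ 25 → ∀ (m : Int), 0 ≤ m →
    (getfLoop m (90 - j) []).reverse =
      List.replicate (PySem.Int.bitLength (m >>> j)) 'Z' ++ descL (25 - j) j m := by
  intro j
  induction j with
  | zero =>
    intro _ m h0
    rw [getfLoop_z m.toNat m (le_refl _) h0]
    simp [descL]
  | succ j ih =>
    intro hj m h0
    by_cases h : 0 < m
    · have hcv : 90 - (j+1) < 90 := by omega
      rw [getfLoop_step_lt h hcv,
          getfLoop_append (m >>> (1:Nat)).toNat _ (le_refl _) _ _,
          show 90 - (j+1) + 1 = 90 - j from by omega,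
          List.reverse_append, ih (by omega) (m >>> (1:Nat)) (shiftRight_one_nonneg (le_of_lt h)),
          descL_succ (25 - (j+1)) j m, show 25 - (j+1) + 1 = 25 - j from by omega,
          show m >>> (1:Nat) >>> j = m >>> (j+1) from (shift_succ m j).symm,
          List.append_assoc]
      congr 1
      congr 1
      rw [PySem.Int.band_one]
      by_cases h1 : m % 2 = 1
      · simp [h1]
        congr 1
        omega
      · simp [h1]
    · have hm : m = 0 := by omega
      subst hm
      rw [getfLoop_stop (by omega)]
      simp [descL, PySem.Int.bitLength_zero, Int.zero_shiftRight,
        show PySem.Int.band 0 1 = 0 from by decide]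

-- ===== VERDICT (by name: the statement is the Claim_ definition above) =====
theorem get_formatted_string_spec : Claim_equal_get_formatted_string := by
  intro n _
  show get_formatted_string n = get_formatted_string_alt n
  unfold get_formatted_string get_formatted_string_alt
  rw [PySem.List.slice?_none_none_neg_one]
  by_cases h : n ≤ 0
  · rw [getfLoop_stop (by omega)]
    simp [h]
  · simp only [h, if_false]
    have h0 : 0 ≤ n := by omega
    have hL := getfLoop_letters 25 (le_refl _) n h0
    simp only [show (90:Nat) - 25 = 65 from rfl, show (25:Nat) - 25 = 0 from rfl] at hL
    simp only [Option.getD_some, hL, descL, Nat.add_zero]
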